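-- pv_equiv track=rewrite | github.com/CozyKim/code_practices | BOJ/2303.py | find_max_card
-- ===== SOURCE A (Python) =====
-- from itertools import combinations
--
-- def find_max_card(n: list):
--     combi = set(combinations(n, 3))
--     dex_max = 0
--     for i in combi:
--         dex = sum(i) % 10
--         if dex_max <= dex:
--             dex_max = dex
--     return dex_max
-- ===== SOURCE B (Python) =====
-- def find_max_card(n: list):
--     # reach[k][s] == True  iff  some k of the cards seen so far sum to s (mod 10)
--     reach = [[False] * 10 for _ in range(4)]
--     reach[0][0] = True
--     for x in n:
--         r = x % 10
--         for k in (3, 2, 1):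
--             for s in range(10):
--                 if reach[k - 1][s]:
--                     reach[k][(s + r) % 10] = True
--     best = 0
--     for s in range(10):
--         if reach[3][s]:
--             best = s
--     return best
-- ===== Notes on version B (the rewrite author's own statement) =====
-- stated objective: faster
-- what changed: Replaces enumeration of all C(n,3) triples with a one-pass DP over the cards that tracks which residues mod 10 are reachable with exactly 0..3 cards, then reads off the largest reachable residue for 3 cards.
import Mathlib
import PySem

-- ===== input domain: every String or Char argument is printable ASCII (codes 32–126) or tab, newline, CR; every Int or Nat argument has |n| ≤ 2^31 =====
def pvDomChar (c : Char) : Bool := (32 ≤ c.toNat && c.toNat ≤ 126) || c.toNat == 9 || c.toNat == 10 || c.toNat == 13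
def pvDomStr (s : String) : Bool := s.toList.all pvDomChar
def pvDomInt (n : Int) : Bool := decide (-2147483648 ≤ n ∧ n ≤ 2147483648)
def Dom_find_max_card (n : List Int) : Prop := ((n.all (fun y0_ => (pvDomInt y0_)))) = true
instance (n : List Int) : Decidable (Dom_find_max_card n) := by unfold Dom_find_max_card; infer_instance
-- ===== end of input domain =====

-- B replaces A's enumeration of all 3-card combinations with a one-pass reachable-residue DP (faster).

-- ===== PORT A =====
-- itertools.combinations(n, 2) / (n, 3), in itertools' emission order
def pvPairs : List Int → List (Int × Int)
  | [] => []
  | x :: xs => xs.map (fun y => (x, y)) ++ pvPairs xs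

def pvComb3 : List Int → List (Int × Int × Int)
  | [] => []
  | x :: xs => (pvPairs xs).map (fun p => (x, p.1, p.2)) ++ pvComb3 xs

-- max is insensitive to the (unmodelled) iteration order of the Python set
def find_max_card (n : List Int) : Int :=
  let combi : PySem.Set (Int × Int × Int) := PySem.Set.ofList (pvComb3 n)
  combi.foldl (fun dex_max i =>
    let dex := PySem.Int.mod (0 + i.1 + i.2.1 + i.2.2) 10
    if dex_max ≤ dex then dex else dex_max) 0

-- ===== PORT B =====
def pvFalses : List Bool := List.replicate 10 false          -- [False] * 10
def pvReach0 : List Bool := true :: List.replicate 9 false   -- reach[0] after reach[0][0] = True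

-- inner 'for s in range(10)' for one level k: reads lo = reach[k-1], updates hi = reach[k];
-- the written index (s + r) % 10 is provably < 10 = len hi, so List.set is exact (no IndexError)
def pvShift (lo hi : List Bool) (r : Nat) : List Bool :=
  (List.range 10).foldl (fun h s => if lo.getD s false then h.set ((s + r) % 10) true else h) hi

-- one card x: the Python loop runs k = 3, 2, 1 and at level k reads reach[k-1] not yet
-- updated for x, so the three updates are simultaneous; r = x % 10 is in [0,10), toNat exact
def pvStep (st : List Bool × List Bool × List Bool) (x : Int) : List Bool × List Bool × List Bool :=
  let r : Nat := (PySem.Int.mod x 10).toNat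
  (pvShift pvReach0 st.1 r, pvShift st.1 st.2.1 r, pvShift st.2.1 st.2.2 r)

def find_max_card_alt (n : List Int) : Int :=
  let st := n.foldl pvStep (pvFalses, pvFalses, pvFalses)
  (List.range 10).foldl (fun best s => if st.2.2.getD s false then (s : Int) else best) 0

-- ===== PRECONDITION & SPEC =====
def Spec_find_max_card (n : List Int) (out : Int) : Prop := out = find_max_card_alt n
instance (n : List Int) (out : Int) : Decidable (Spec_find_max_card n out) := by unfold Spec_find_max_card; infer_instance

-- ===== CLAIM (what is proved, stated in full; the proofs are below) =====
def Claim_equal_find_max_card : Prop := ∀ (n : List Int), Dom_find_max_card n → Spec_find_max_card n (find_max_card n)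

-- ===== LEMMAS AND PROOFS =====

-- "some k cards of n sum to j (mod 10)"
def pvP (n : List Int) (k : Nat) (j : Nat) : Prop :=
  ∃ t : List Int, t.Sublist n ∧ t.length = k ∧ t.sum % 10 = (j : Int)

def pvInv (n : List Int) (st : List Bool × List Bool × List Bool) : Prop :=
  st.1.length = 10 ∧ st.2.1.length = 10 ∧ st.2.2.length = 10 ∧
  ∀ j, j < 10 →
    ((st.1.getD j false = true ↔ pvP n 1 j) ∧
     (st.2.1.getD j false = true ↔ pvP n 2 j) ∧
     (st.2.2.getD j false = true ↔ pvP n 3 j))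

-- ---- A-side fold: running maximum ----
lemma pvFoldA_char {α : Type} (f : α → Int) :
    ∀ (L : List α) (c : Int),
      (c ≤ L.foldl (fun m i => if m ≤ f i then f i else m) c) ∧
      (L.foldl (fun m i => if m ≤ f i then f i else m) c = c ∨
        ∃ i ∈ L, L.foldl (fun m i => if m ≤ f i then f i else m) c = f i) ∧
      (∀ i ∈ L, f i ≤ L.foldl (fun m i => if m ≤ f i then f i else m) c) := by
  intro L
  induction L with
  | nil => intro c; refine ⟨le_refl _, Or.inl rfl, by simp⟩
  | cons x L ih =>
    intro c
    have h := ih (if c ≤ f x then f x else c)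
    obtain ⟨h1, h2, h3⟩ := h
    refine ⟨?_, ?_, ?_⟩
    · exact le_trans (by split_ifs with hc <;> omega) h1
    · rcases h2 with h2 | ⟨i, hi, hR⟩
      · by_cases hc : c ≤ f x
        · right; refine ⟨x, List.mem_cons_self .., ?_⟩
          rw [if_pos hc] at h2; simpa [List.foldl_cons, hc] using h2
        · left; rw [if_neg hc] at h2; simpa [List.foldl_cons, hc] using h2
      · right; exact ⟨i, List.mem_cons_of_mem _ hi, hR⟩
    · intro i hi
      rcases List.mem_cons.mp hi with rfl | hi
      · exact le_trans (by split_ifs with hc <;> omega) h1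
      · exact h3 i hi
-- ---- B-side fold: last index with a true flag ----
lemma pvFoldB_char (g : Nat → Bool) :
    ∀ (L : List Nat) (c : Int), L.Pairwise (· ≤ ·) →
      (L.foldl (fun best s => if g s then (s : Int) else best) c = c ∨
        ∃ s ∈ L, g s = true ∧ L.foldl (fun best s => if g s then (s : Int) else best) c = (s : Int)) ∧
      (∀ s ∈ L, g s = true → (s : Int) ≤ L.foldl (fun best s => if g s then (s : Int) else best) c) := by
  intro L
  induction L with
  | nil => intro c _; exact ⟨Or.inl rfl, by simp⟩
  | cons x L ih =>
    intro c hp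
    have hple : L.Pairwise (· ≤ ·) := hp.of_cons
    have hxle : ∀ s ∈ L, x ≤ s := fun s hs => List.rel_of_pairwise_cons hp hs
    obtain ⟨h2, h3⟩ := ih (if g x then (x : Int) else c) hple
    constructor
    · rcases h2 with h2 | ⟨s, hs, hgs, hR⟩
      · by_cases hg : g x = true
        · right; refine ⟨x, List.mem_cons_self .., hg, ?_⟩
          rw [if_pos hg] at h2; simpa [List.foldl_cons, hg] using h2
        · left; rw [if_neg hg] at h2; simpa [List.foldl_cons, hg] using h2
      · right; exact ⟨s, List.mem_cons_of_mem _ hs, hgs, hR⟩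
    · intro s hs hgs
      rcases List.mem_cons.mp hs with rfl | hs
      · rcases h2 with h2 | ⟨t, ht, hgt, hR⟩
        · simp only [List.foldl_cons, if_pos hgs]
          rw [if_pos hgs] at h2; rw [h2]
        · simp only [List.foldl_cons]; rw [hR]; exact_mod_cast hxle t ht
      · exact h3 s hs hgs

-- ---- combinations membership ----
lemma mem_pvPairs (y z : Int) : ∀ l : List Int, ((y, z) ∈ pvPairs l ↔ [y, z].Sublist l) := by
  intro l
  induction l with
  | nil => simp [pvPairs]
  | cons a l ih =>
    simp only [pvPairs, List.mem_append, List.mem_map]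
    constructor
    · rintro (⟨w, hw, hyz⟩ | h)
      · obtain ⟨rfl, rfl⟩ : a = y ∧ w = z := by
          constructor <;> [exact (Prod.mk.injEq .. ▸ hyz).1; exact (Prod.mk.injEq .. ▸ hyz).2]
        exact (List.singleton_sublist.mpr hw).cons₂ _
      · exact (ih.mp h).cons a
    · intro h
      cases h with
      | cons _ h' => right; exact ih.mpr h'
      | cons₂ _ h' => left; exact ⟨z, List.singleton_sublist.mp h', rfl⟩

lemma mem_pvComb3 (x y z : Int) : ∀ l : List Int, ((x, y, z) ∈ pvComb3 l ↔ [x, y, z].Sublist l) := by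
  intro l
  induction l with
  | nil => simp [pvComb3]
  | cons a l ih =>
    simp only [pvComb3, List.mem_append, List.mem_map]
    constructor
    · rintro (⟨p, hp, hxyz⟩ | h)
      · obtain ⟨rfl, rfl, rfl⟩ : a = x ∧ p.1 = y ∧ p.2 = z := by
          refine ⟨(Prod.mk.injEq .. ▸ hxyz).1, ?_, ?_⟩
          · have := (Prod.mk.injEq .. ▸ hxyz).2; exact (Prod.mk.injEq .. ▸ this).1
          · have := (Prod.mk.injEq .. ▸ hxyz).2; exact (Prod.mk.injEq .. ▸ this).2
        exact ((mem_pvPairs p.1 p.2 l).mp hp).cons₂ _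
      · exact (ih.mp h).cons a
    · intro h
      cases h with
      | cons _ h' => right; exact ih.mpr h'
      | cons₂ _ h' => left; exact ⟨(y, z), (mem_pvPairs y z l).mpr h', rfl⟩

-- ---- pvShift ----
lemma getD_set_true (hi : List Bool) (i j : Nat) (hlt : i < hi.length) :
    (hi.set i true).getD j false = if i = j then true else hi.getD j false := by
  by_cases hij : i = j
  · subst hij; simp [List.getD, hlt]
  · simp [List.getD, hij]

lemma pvShiftFold_length (lo : List Bool) (r : Nat) :
    ∀ (L : List Nat) (hi : List Bool),
      (L.foldl (fun h s => if lo.getD s false then h.set ((s + r) % 10) true else h) hi).length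
        = hi.length := by
  intro L
  induction L with
  | nil => intro hi; rfl
  | cons s L ih =>
    intro hi
    rw [List.foldl_cons, ih]
    split_ifs <;> simp

lemma pvShiftFold_getD (lo : List Bool) (r : Nat) :
    ∀ (L : List Nat) (hi : List Bool), hi.length = 10 → ∀ j, j < 10 →
      ((L.foldl (fun h s => if lo.getD s false then h.set ((s + r) % 10) true else h) hi).getD j false = true
        ↔ (hi.getD j false = true ∨ ∃ s ∈ L, lo.getD s false = true ∧ (s + r) % 10 = j)) := by
  intro L
  induction L with
  | nil => intro hi _ j _; simp
  | cons s L ih =>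
    intro hi hlen j hj
    rw [List.foldl_cons]
    by_cases hg : lo.getD s false = true
    · rw [if_pos hg]
      have hlt : (s + r) % 10 < hi.length := by omega
      rw [ih (hi.set ((s + r) % 10) true) (by simpa using hlen) j hj]
      rw [getD_set_true hi _ j hlt]
      by_cases hsj : (s + r) % 10 = j
      · simp only [if_pos hsj]
        constructor
        · intro _; right; exact ⟨s, List.mem_cons_self .., hg, hsj⟩
        · intro _; exact Or.inl trivial
      · simp only [if_neg hsj, List.mem_cons]
        constructor
        · rintro (h | ⟨t, ht, hgt, hmt⟩)
          · exact Or.inl h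
          · exact Or.inr ⟨t, Or.inr ht, hgt, hmt⟩
        · rintro (h | ⟨t, (rfl | ht), hgt, hmt⟩)
          · exact Or.inl h
          · exact absurd hmt hsj
          · exact Or.inr ⟨t, ht, hgt, hmt⟩
    · rw [if_neg hg, ih hi hlen j hj]
      constructor
      · rintro (h | ⟨t, ht, hgt, hmt⟩)
        · exact Or.inl h
        · exact Or.inr ⟨t, List.mem_cons_of_mem _ ht, hgt, hmt⟩
      · rintro (h | ⟨t, ht, hgt, hmt⟩)
        · exact Or.inl h
        · rcases List.mem_cons.mp ht with rfl | ht
          · exact absurd hgt hg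
          · exact Or.inr ⟨t, ht, hgt, hmt⟩

lemma pvShift_length (lo hi : List Bool) (r : Nat) : (pvShift lo hi r).length = hi.length :=
  pvShiftFold_length lo r (List.range 10) hi

lemma pvShift_getD (lo hi : List Bool) (r : Nat) (hlen : hi.length = 10) (j : Nat) (hj : j < 10) :
    ((pvShift lo hi r).getD j false = true
      ↔ (hi.getD j false = true ∨ ∃ s, s < 10 ∧ lo.getD s false = true ∧ (s + r) % 10 = j)) := by
  rw [pvShift, pvShiftFold_getD lo r (List.range 10) hi hlen j hj]
  simp [List.mem_range]

-- ---- pvP ----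
lemma pvP_nil (k j : Nat) (hk : k ≠ 0) : ¬ pvP [] k j := by
  rintro ⟨t, hsub, hlen, _⟩
  rw [List.sublist_nil] at hsub
  subst hsub
  simp at hlen
  omega

lemma pvP_zero (n : List Int) (s : Nat) (hs : s < 10) : pvP n 0 s ↔ s = 0 := by
  constructor
  · rintro ⟨t, _, hlen, hsum⟩
    rw [List.length_eq_zero_iff] at hlen
    subst hlen
    simp at hsum
    omega
  · rintro rfl
    exact ⟨[], List.nil_sublist _, rfl, by simp⟩

lemma pvP_append (n : List Int) (x : Int) (k j : Nat) (hk : 1 ≤ k) :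
    pvP (n ++ [x]) k j ↔
      (pvP n k j ∨ ∃ s, s < 10 ∧ pvP n (k - 1) s ∧ (s + (x % 10).toNat) % 10 = j) := by
  constructor
  · rintro ⟨t, hsub, hlen, hsum⟩
    rcases List.sublist_append_iff.mp hsub with ⟨a, b, rfl, ha, hb⟩
    rcases List.sublist_singleton.mp hb with rfl | rfl
    · left; exact ⟨a, ha, by simpa using hlen, by simpa using hsum⟩
    · right
      have h0 : (0 : Int) ≤ a.sum % 10 := Int.emod_nonneg _ (by norm_num)
      have hlt : a.sum % 10 < 10 := Int.emod_lt_of_pos _ (by norm_num)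
      have hsum' : (a.sum + x) % 10 = (j : Int) := by simpa using hsum
      refine ⟨(a.sum % 10).toNat, by omega, ⟨a, ha, ?_, (Int.toNat_of_nonneg h0).symm⟩, ?_⟩
      · have : a.length + 1 = k := by simpa using hlen
        omega
      · omega
  · rintro (⟨t, hsub, hlen, hsum⟩ | ⟨s, hs, ⟨t, hsub, hlen, hsum⟩, hmod⟩)
    · exact ⟨t, hsub.trans (List.sublist_append_left _ _), hlen, hsum⟩
    · refine ⟨t ++ [x], hsub.append (List.Sublist.refl _), by simp [hlen]; omega, ?_⟩
      have : (t ++ [x]).sum = t.sum + x := by simp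
      rw [this]
      omega

-- ---- invariant ----
lemma pvReach0_getD (s : Nat) : (pvReach0.getD s false = true) ↔ s = 0 := by
  cases s with
  | zero => simp [pvReach0]
  | succ s =>
    have h9 : (List.replicate 9 false).getD s false = false := by
      rw [List.getD, List.getElem?_replicate]; split <;> rfl
    rw [pvReach0, List.getD_cons_succ, h9]
    simp

lemma pvStep_inv (n : List Int) (x : Int) (st : List Bool × List Bool × List Bool)
    (h : pvInv n st) : pvInv (n ++ [x]) (pvStep st x) := by
  obtain ⟨h1, h2, h3, hch⟩ := h
  have hm : PySem.Int.mod x 10 = x % 10 := PySem.Int.mod_eq_emod_of_pos (by norm_num)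
  refine ⟨by simpa [pvStep] using pvShift_length pvReach0 st.1 _ ▸ h1,
          by simpa [pvStep] using pvShift_length st.1 st.2.1 _ ▸ h2,
          by simpa [pvStep] using pvShift_length st.2.1 st.2.2 _ ▸ h3, ?_⟩
  intro j hj
  have hr : (PySem.Int.mod x 10).toNat = (x % 10).toNat := by rw [hm]
  refine ⟨?_, ?_, ?_⟩
  · show (pvShift pvReach0 st.1 (PySem.Int.mod x 10).toNat).getD j false = true ↔ _
    rw [hr, pvShift_getD pvReach0 st.1 _ h1 j hj, pvP_append n x 1 j (le_refl 1)]
    constructor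
    · rintro (hh | ⟨s, hs, hg, hmj⟩)
      · exact Or.inl ((hch j hj).1.mp hh)
      · have hs0 : s = 0 := (pvReach0_getD s).mp hg
        exact Or.inr ⟨s, hs, by rw [pvP_zero n s hs]; exact hs0, hmj⟩
    · rintro (hh | ⟨s, hs, hp, hmj⟩)
      · exact Or.inl ((hch j hj).1.mpr hh)
      · exact Or.inr ⟨s, hs, (pvReach0_getD s).mpr ((pvP_zero n s hs).mp hp), hmj⟩
  · show (pvShift st.1 st.2.1 (PySem.Int.mod x 10).toNat).getD j false = true ↔ _
    rw [hr, pvShift_getD st.1 st.2.1 _ h2 j hj, pvP_append n x 2 j (by norm_num)]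
    constructor
    · rintro (hh | ⟨s, hs, hg, hmj⟩)
      · exact Or.inl ((hch j hj).2.1.mp hh)
      · exact Or.inr ⟨s, hs, ((hch s hs).1.mp hg), hmj⟩
    · rintro (hh | ⟨s, hs, hp, hmj⟩)
      · exact Or.inl ((hch j hj).2.1.mpr hh)
      · exact Or.inr ⟨s, hs, ((hch s hs).1.mpr hp), hmj⟩
  · show (pvShift st.2.1 st.2.2 (PySem.Int.mod x 10).toNat).getD j false = true ↔ _
    rw [hr, pvShift_getD st.2.1 st.2.2 _ h3 j hj, pvP_append n x 3 j (by norm_num)]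
    constructor
    · rintro (hh | ⟨s, hs, hg, hmj⟩)
      · exact Or.inl ((hch j hj).2.2.mp hh)
      · exact Or.inr ⟨s, hs, ((hch s hs).2.1.mp hg), hmj⟩
    · rintro (hh | ⟨s, hs, hp, hmj⟩)
      · exact Or.inl ((hch j hj).2.2.mpr hh)
      · exact Or.inr ⟨s, hs, ((hch s hs).2.1.mpr hp), hmj⟩

lemma pvInv_foldl (n : List Int) : pvInv n (n.foldl pvStep (pvFalses, pvFalses, pvFalses)) := by
  induction n using List.reverseRecOn with
  | nil =>
    rw [List.foldl_nil]
    refine ⟨by simp [pvFalses], by simp [pvFalses], by simp [pvFalses], ?_⟩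
    intro j hj
    have hF : pvFalses.getD j false = false := by
      rw [pvFalses, List.getD, List.getElem?_replicate]; split <;> rfl
    refine ⟨?_, ?_, ?_⟩ <;>
      (constructor
       · intro hh; rw [hF] at hh; exact absurd hh (by simp)
       · intro hp; exact absurd hp (pvP_nil _ _ (by norm_num)))
  | append_singleton l x ih =>
    rw [List.foldl_append, List.foldl_cons, List.foldl_nil]
    exact pvStep_inv l x _ ih

-- ---- pvP 3 vs combinations ----
lemma pvP3_iff (n : List Int) (j : Nat) :
    pvP n 3 j ↔ ∃ i ∈ pvComb3 n, (i.1 + i.2.1 + i.2.2) % 10 = (j : Int) := by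
  constructor
  · rintro ⟨t, hsub, hlen, hsum⟩
    rcases t with _ | ⟨a, _ | ⟨b, _ | ⟨c, _ | ⟨d, t⟩⟩⟩⟩ <;> simp at hlen
    refine ⟨(a, b, c), (mem_pvComb3 a b c n).mpr hsub, ?_⟩
    have : ([a, b, c] : List Int).sum = a + b + c := by simp; ring
    rw [this] at hsum
    exact hsum
  · rintro ⟨i, hi, hfi⟩
    refine ⟨[i.1, i.2.1, i.2.2], (mem_pvComb3 i.1 i.2.1 i.2.2 n).mp ?_, rfl, ?_⟩
    · exact hi
    · have : ([i.1, i.2.1, i.2.2] : List Int).sum = i.1 + i.2.1 + i.2.2 := by simp; ring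
      rw [this]
      exact hfi

-- ===== VERDICT (by name: the statement is the Claim_ definition above) =====
theorem find_max_card_spec : Claim_equal_find_max_card := by
  intro n _
  unfold Spec_find_max_card
  -- abbreviations
  have hinv := pvInv_foldl n
  obtain ⟨_, _, hlen3, hch⟩ := hinv
  set st := n.foldl pvStep (pvFalses, pvFalses, pvFalses) with hst
  set f : Int × Int × Int → Int := fun i => PySem.Int.mod (0 + i.1 + i.2.1 + i.2.2) 10 with hf
  have hfval : ∀ i : Int × Int × Int, f i = (i.1 + i.2.1 + i.2.2) % 10 := by
    intro i
    rw [hf]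
    show PySem.Int.mod (0 + i.1 + i.2.1 + i.2.2) 10 = _
    rw [PySem.Int.mod_eq_emod_of_pos (by norm_num)]
    ring_nf
  set L := PySem.Set.ofList (pvComb3 n) with hL
  have hAeq : find_max_card n = L.foldl (fun m i => if m ≤ f i then f i else m) 0 := rfl
  have hBeq : find_max_card_alt n
      = (List.range 10).foldl (fun best s => if st.2.2.getD s false then (s : Int) else best) 0 := rfl
  obtain ⟨hA0, hAmem, hAub⟩ := pvFoldA_char f L 0
  obtain ⟨hBmem, hBub⟩ := pvFoldB_char (fun s => st.2.2.getD s false) (List.range 10) 0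
    (List.pairwise_lt_range.imp le_of_lt)
  rw [hAeq, hBeq]
  apply le_antisymm
  · rcases hAmem with hA | ⟨i, hi, hR⟩
    · rw [hA]
      rcases hBmem with hB | ⟨s, _, _, hR⟩
      · rw [hB]
      · rw [hR]; positivity
    · rw [hR]
      have h0 : (0 : Int) ≤ f i := by rw [hfval]; exact Int.emod_nonneg _ (by norm_num)
      have hlt : f i < 10 := by rw [hfval]; exact Int.emod_lt_of_pos _ (by norm_num)
      have hjlt : (f i).toNat < 10 := by omega
      have hp : pvP n 3 (f i).toNat := by
        rw [pvP3_iff]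
        refine ⟨i, (PySem.Set.mem_ofList _ _).mp hi, ?_⟩
        rw [← hfval, Int.toNat_of_nonneg h0]
      have hg : st.2.2.getD (f i).toNat false = true := ((hch _ hjlt).2.2).mpr hp
      have := hBub (f i).toNat (List.mem_range.mpr hjlt) hg
      rw [Int.toNat_of_nonneg h0] at this
      exact this
  · rcases hBmem with hB | ⟨s, hs, hg, hR⟩
    · rw [hB]; exact hA0
    · rw [hR]
      have hs10 : s < 10 := List.mem_range.mp hs
      have hp : pvP n 3 s := ((hch s hs10).2.2).mp hg
      obtain ⟨i, hi, hfi⟩ := (pvP3_iff n s).mp hp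
      have := hAub i ((PySem.Set.mem_ofList _ _).mpr hi)
      rw [hfval] at this
      rw [← hfi]
      exact this
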